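-- pv_equiv track=rewrite | github.com/hritvikgupta/Archimyst-Terminal | archcode-cli/tools/edit_engine/editblock_engine.py | find_filename
-- ===== SOURCE A (Python) =====
-- def find_filename(lines, fence):
--     lines = list(lines)
--     lines.reverse()
--     for line in lines:
--         line = line.strip()
--         if not line: continue
--         if line.startswith(fence[0]): continue
--         # Basic cleanup similar to Aider's strip_filename
--         filename = line.rstrip(":").lstrip("#").strip("`").strip("*").strip()
--         if filename and ("." in filename or "/" in filename):
--             return filename
--     return None
-- ===== SOURCE B (Python) =====
-- def find_filename(lines, fence):
--     # Single forward pass with an overwriting accumulator: the last matching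
--     # line in original order equals A's first match scanning from the end.
--     result = None
--     for line in lines:
--         line = line.strip()
--         if line and not line.startswith(fence[0]):
--             filename = line.rstrip(":").lstrip("#").strip("`").strip("*").strip()
--             if filename and ("." in filename or "/" in filename):
--                 result = filename
--     return result
-- ===== Notes on version B (the rewrite author's own statement) =====
-- stated objective: simpler
-- what changed: Instead of materialising and reversing the list and returning on the first match, B makes one forward pass keeping an overwriting result accumulator and returns it after the loop.
import Mathlib
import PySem

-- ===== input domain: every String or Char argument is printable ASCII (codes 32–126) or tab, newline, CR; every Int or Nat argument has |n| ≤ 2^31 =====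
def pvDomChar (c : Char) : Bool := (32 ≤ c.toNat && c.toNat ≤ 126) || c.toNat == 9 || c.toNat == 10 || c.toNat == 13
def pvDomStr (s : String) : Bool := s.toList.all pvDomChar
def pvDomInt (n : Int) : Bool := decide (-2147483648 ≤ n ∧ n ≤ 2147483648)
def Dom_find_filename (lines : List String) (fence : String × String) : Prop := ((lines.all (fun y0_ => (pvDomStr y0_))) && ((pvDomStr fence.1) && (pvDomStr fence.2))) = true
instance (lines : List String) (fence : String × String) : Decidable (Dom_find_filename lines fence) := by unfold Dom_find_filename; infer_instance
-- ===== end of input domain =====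

-- B replaces A's list-reverse plus first-match early-return scan by one forward
-- pass with an overwriting result accumulator (objective: simpler).

-- ===== PORT A =====
-- s.rstrip(":") / s.lstrip("#"): PySem has no chars-variant of one-sided strip;
-- ported by hand (exact: drop the given character from the one end).
def aRstripColon (s : String) : String :=
  String.ofList ((s.toList.reverse.dropWhile (fun c => c == ':')).reverse)

def aLstripHash (s : String) : String :=
  String.ofList (s.toList.dropWhile (fun c => c == '#'))

-- A: reverse the list, then scan it returning the FIRST match, continue-style.
def aScan (fence0 : String) : List String → Option String
  | [] => none
  | l0 :: rest =>
    let line := PySem.Str.strip l0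
    if line = "" then aScan fence0 rest
    else if PySem.Str.startswith line fence0 then aScan fence0 rest
    else
      let filename := PySem.Str.strip (PySem.Str.stripChars
        (PySem.Str.stripChars (aLstripHash (aRstripColon line)) "`") "*")
      if filename ≠ "" ∧ (PySem.Str.isIn "." filename || PySem.Str.isIn "/" filename) = true
      then some filename
      else aScan fence0 rest

def find_filename (lines : List String) (fence : String × String) : Option String :=
  aScan fence.1 lines.reverse

-- ===== PORT B =====
-- Source B's one-sided strips, written with rdropWhile/dropWhile on the char list
def bRstrip (chars : List Char) (s : String) : String :=
  String.ofList (s.toList.rdropWhile (chars.contains ·))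

def bLstrip (chars : List Char) (s : String) : String :=
  String.ofList (s.toList.dropWhile (chars.contains ·))

-- B: single forward foldl; a later match overwrites the accumulator.
def find_filename_alt (lines : List String) (fence : String × String) : Option String :=
  lines.foldl (fun result l0 =>
    let line := PySem.Str.strip l0
    if line ≠ "" && !(PySem.Str.startswith line fence.1) then
      let filename := PySem.Str.strip (PySem.Str.stripChars
        (PySem.Str.stripChars (bLstrip ['#'] (bRstrip [':'] line)) "`") "*")
      if filename ≠ "" && (PySem.Str.isIn "." filename || PySem.Str.isIn "/" filename)
      then some filename
      else result
    else result) none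

-- ===== PRECONDITION & SPEC =====
def Spec_find_filename (lines : List String) (fence : String × String) (out : Option String) : Prop := out = find_filename_alt lines fence
instance (lines : List String) (fence : String × String) (out : Option String) : Decidable (Spec_find_filename lines fence out) := by unfold Spec_find_filename; infer_instance

-- ===== CLAIM (what is proved, stated in full; the proofs are below) =====
def Claim_equal_find_filename : Prop := ∀ (lines : List String) (fence : String × String), Dom_find_filename lines fence → Spec_find_filename lines fence (find_filename lines fence)

-- ===== LEMMAS AND PROOFS =====

-- proof-side abstraction of the per-line test shared (semantically) by both ports
def mCheck (fence0 l0 : String) : Option String :=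
  let line := PySem.Str.strip l0
  if line = "" then none
  else if PySem.Str.startswith line fence0 then none
  else
    let filename := PySem.Str.strip (PySem.Str.stripChars
      (PySem.Str.stripChars (aLstripHash (aRstripColon line)) "`") "*")
    if filename ≠ "" ∧ (PySem.Str.isIn "." filename || PySem.Str.isIn "/" filename) = true
    then some filename else none

theorem contains_singleton_eq (a : Char) :
    (fun c => [a].contains c) = (fun c : Char => c == a) := by
  funext c; by_cases h : c = a <;> simp [h]

theorem clean_eq (s : String) :
    bLstrip ['#'] (bRstrip [':'] s) = aLstripHash (aRstripColon s) := by
  simp only [bLstrip, bRstrip, aLstripHash, aRstripColon, List.rdropWhile,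
    contains_singleton_eq]

theorem aScan_cons (fence0 x : String) (xs : List String) :
    aScan fence0 (x :: xs)
      = match mCheck fence0 x with | some v => some v | none => aScan fence0 xs := by
  simp only [aScan, mCheck]
  split_ifs <;> rfl

theorem aScan_eq_head (fence0 : String) (l : List String) :
    aScan fence0 l = (l.filterMap (mCheck fence0)).head? := by
  induction l with
  | nil => rfl
  | cons x xs ih =>
    rw [aScan_cons, List.filterMap_cons]
    cases mCheck fence0 x <;> simp [ih]

theorem bStep_eq (fence0 : String) (result : Option String) (l0 : String) :
    (let line := PySem.Str.strip l0
     if line ≠ "" && !(PySem.Str.startswith line fence0) then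
       let filename := PySem.Str.strip (PySem.Str.stripChars
         (PySem.Str.stripChars (bLstrip ['#'] (bRstrip [':'] line)) "`") "*")
       if filename ≠ "" && (PySem.Str.isIn "." filename || PySem.Str.isIn "/" filename)
       then some filename
       else result
     else result)
    = match mCheck fence0 l0 with | some v => some v | none => result := by
  simp only [mCheck, clean_eq]
  split_ifs with h1 h2 h3 <;> simp_all

theorem foldl_lastMatch (f : String → Option String) (xs : List String) (a : Option String) :
    xs.foldl (fun acc x => match f x with | some v => some v | none => acc) a
      = match (xs.filterMap f).getLast? with | some v => some v | none => a := by
  induction xs generalizing a with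
  | nil => rfl
  | cons x xs ih =>
    simp only [List.foldl_cons, List.filterMap_cons, ih]
    cases hfx : f x with
    | none => rfl
    | some v =>
      cases hl : (xs.filterMap f).getLast? with
      | none => simp [List.getLast?_cons, hl]
      | some w => simp [List.getLast?_cons, hl]

-- ===== VERDICT (by name: the statement is the Claim_ definition above) =====
theorem find_filename_spec : Claim_equal_find_filename := by
  intro lines fence _
  show find_filename lines fence = find_filename_alt lines fence
  have hB : find_filename_alt lines fence
      = lines.foldl (fun acc x => match mCheck fence.1 x with
          | some v => some v | none => acc) none := by
    unfold find_filename_alt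
    congr 1
    funext acc x
    exact bStep_eq fence.1 acc x
  rw [find_filename, hB, foldl_lastMatch, aScan_eq_head,
    List.filterMap_reverse, List.head?_reverse]
  cases (lines.filterMap (mCheck fence.1)).getLast? <;> rfl
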